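-- pv_equiv track=rewrite | github.com/aruaru0/python_myatcoder | AWC/awc0002/e.py | f
-- ===== SOURCE A (Python) =====
-- from collections import defaultdict
--
-- def f(x) :
--     ret = defaultdict(int)
--     n = len(x)
--     for s in range(1<<n) :
--         tot = 0
--         for j in range(n) :
--             if (s>>j)%2 :
--                 tot += x[j]
--         ret[tot] += 1
--
--     return ret
-- ===== SOURCE B (Python) =====
-- def f(x):
--     ret = {0: 1}
--     for v in x:
--         for k, c in list(ret.items()):
--             ret[k + v] = ret.get(k + v, 0) + c
--     return ret
-- ===== Notes on version B (the rewrite author's own statement) =====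
-- stated objective: faster
-- what changed: Replaces the enumeration of all 2^n bitmasks with an inner n-bit loop by an incremental subset-sum DP that folds each element into a running sum->count dict, merging equal sums as it goes.
import Mathlib
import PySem

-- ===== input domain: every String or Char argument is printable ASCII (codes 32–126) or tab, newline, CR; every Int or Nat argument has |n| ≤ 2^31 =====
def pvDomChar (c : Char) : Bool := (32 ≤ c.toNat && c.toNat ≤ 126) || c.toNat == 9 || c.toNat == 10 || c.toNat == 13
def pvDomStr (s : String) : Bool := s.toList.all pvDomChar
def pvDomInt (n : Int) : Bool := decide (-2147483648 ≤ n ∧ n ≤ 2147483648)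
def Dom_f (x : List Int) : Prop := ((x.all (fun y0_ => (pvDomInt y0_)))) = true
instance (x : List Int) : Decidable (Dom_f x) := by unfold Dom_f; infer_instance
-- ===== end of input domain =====

-- B replaces A's scan of all 2^n bitmasks (recomputing each subset sum bit by bit) with an
-- incremental DP that folds each element into a running sum->count dict: faster.

-- ===== PORT A =====
def f (x : List Int) : List (Int × Int) :=
  let n := x.length
  let ret := (PySem.List.pyRange 0 ((1 <<< n : Nat) : Int) 1).foldl
    (fun d s =>
      let tot := (PySem.List.pyRange 0 (n : Int) 1).foldl
        (fun tot j =>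
          if PySem.Int.mod (s >>> j.toNat) 2 ≠ 0 then tot + PySem.List.pyGetD x j 0 else tot) 0
      d.modify tot 0 (· + 1))
    (PySem.Dict.empty : PySem.Dict Int Int)
  ret.items

-- ===== PORT B =====
def f_alt (x : List Int) : List (Int × Int) :=
  let ret := x.foldl
    (fun d v => d.items.foldl
      (fun d' p => d'.insert (p.1 + v) (d'.getD (p.1 + v) 0 + p.2)) d)
    ((PySem.Dict.empty : PySem.Dict Int Int).insert 0 1)
  ret.items

-- ===== PRECONDITION & SPEC =====
def Spec_f (x : List Int) (out : List (Int × Int)) : Prop := out = f_alt x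
instance (x : List Int) (out : List (Int × Int)) : Decidable (Spec_f x out) := by unfold Spec_f; infer_instance

-- ===== CLAIM (what is proved, stated in full; the proofs are below) =====
def Claim_equal_f : Prop := ∀ (x : List Int), Dom_f x → Spec_f x (f x)

-- ===== LEMMAS AND PROOFS =====

-- the subset sum selected by mask s (bit j picks x[j])
def pvMaskSum (x : List Int) (s : Nat) : Int :=
  ((List.range x.length).map (fun j => if s.testBit j then x.getD j 0 else 0)).sum

-- the list of all 2^n subset sums in mask order (A's insertion/count order)
def pvSums (x : List Int) : List Int := (List.range (2 ^ x.length)).map (pvMaskSum x)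

lemma pv_foldl_eq_sum {β : Type} (g : β → Int) :
    ∀ (l : List β) (G : Int → β → Int) (init : Int),
      (∀ t : Int, ∀ k ∈ l, G t k = t + g k) → l.foldl G init = init + (l.map g).sum := by
  intro l
  induction l with
  | nil => intro G init _; simp
  | cons b bs ih =>
    intro G init h
    simp only [List.foldl_cons, List.map_cons, List.sum_cons]
    rw [ih G _ (fun t k hk => h t k (List.mem_cons_of_mem b hk)), h init b List.mem_cons_self]
    ring

lemma pv_tot_eq (x : List Int) (s : Int) (m : Nat) (hs : s = (m : Nat)) :
    (PySem.List.pyRange 0 (x.length : Int)).foldl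
      (fun tot j =>
        if PySem.Int.mod (@HShiftRight.hShiftRight Int Nat Int Int.instHShiftRightNat s j.toNat) 2 ≠ 0
        then tot + PySem.List.pyGetD x j 0 else tot) 0
      = pvMaskSum x m := by
  subst hs
  rw [PySem.List.pyRange_zero_natCast, List.foldl_map, pvMaskSum]
  refine (pv_foldl_eq_sum (fun j => if m.testBit j then x.getD j 0 else 0)
    (List.range x.length) _ 0 ?_).trans (zero_add _)
  intro t k _
  simp only [Int.toNat_natCast, PySem.List.pyGetD_natCast]
  have h2 : ((m : Int) >>> (k : Nat)) = ((m >>> k : Nat) : Int) := by simp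
  rw [h2]
  have h3 : PySem.Int.mod (((m >>> k : Nat) : Int)) 2 = ((((m >>> k) % 2 : Nat)) : Int) := by
    exact_mod_cast PySem.Int.mod_natCast (m >>> k) 2
  rw [h3]
  have hq : m >>> k = m / 2 ^ k := Nat.shiftRight_eq_div_pow m k
  rw [Nat.testBit_eq_decide_div_mod_eq]
  by_cases hb : m / 2 ^ k % 2 = 1
  · rw [if_pos (by rw [hq, hb]; norm_num), if_pos (by simp [hb])]
  · rw [if_neg (by rw [hq]; simp only [ne_eq, Nat.cast_eq_zero, not_not]; omega),
        if_neg (by simp [hb])]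
    rw [add_zero]

lemma pv_f_eq_counter (x : List Int) : f x = (PySem.Dict.counter (pvSums x)).items := by
  simp only [f]
  congr 1
  rw [Nat.one_shiftLeft, PySem.List.pyRange_zero_natCast (2 ^ x.length), List.foldl_map,
      PySem.Dict.counter_eq_foldl, pvSums, List.foldl_map]
  apply PySem.List.foldl_congr_mem
  intro d m _
  beta_reduce
  congr 1
  exact pv_tot_eq x ((m : Nat) : Int) m rfl

-- LHS of the crux: inserting shifted keys, reading through the accumulator
lemma pv_ins_fold_getD (y : Int) :
    ∀ (ps : List (Int × Int)) (d : PySem.Dict Int Int) (v : Int),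
      (ps.map (fun p => p.1 + y)).Nodup →
      (ps.foldl (fun d' p => d'.insert (p.1 + y) (d'.getD (p.1 + y) 0 + p.2)) d).getD v 0
        = d.getD v 0 + ((ps.filter (fun p => p.1 + y == v)).map Prod.snd).sum := by
  intro ps
  induction ps with
  | nil => intro d v _; simp
  | cons p rest ih =>
    intro d v hnd
    simp only [List.map_cons, List.nodup_cons] at hnd
    rw [List.foldl_cons, ih _ v hnd.2, PySem.Dict.getD_insert]
    by_cases hv : v = p.1 + y
    · have hrest : rest.filter (fun q => q.1 + y == v) = [] := by
        rw [List.filter_eq_nil_iff]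
        intro q hq hEq
        apply hnd.1
        have hqe : q.1 + y = p.1 + y := hv ▸ (beq_iff_eq.mp hEq)
        rw [← hqe]
        exact List.mem_map.mpr ⟨q, hq, rfl⟩
      rw [if_pos hv, List.filter_cons_of_pos (by simpa using hv.symm), hrest]
      simp [hv]
    · have hbeq : (p.1 + y == v) = false := by
        simp only [beq_eq_false_iff_ne, ne_eq]
        exact fun h => hv h.symm
      rw [if_neg hv]
      simp [hbeq]

lemma pv_filter_nodup (v : Int) :
    ∀ (K : List Int), K.Nodup → K.filter (fun k => k == v) = if v ∈ K then [v] else [] := by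
  intro K
  induction K with
  | nil => intro _; simp
  | cons k ks ih =>
    intro hnd
    simp only [List.nodup_cons] at hnd
    rw [List.filter_cons]
    by_cases hk : k = v
    · subst hk
      simp [ih hnd.2, if_neg hnd.1]
    · have hb : ¬ (k == v) = true := by simpa using hk
      have hk' : ¬ v = k := fun h => hk h.symm
      simp [hb, ih hnd.2, List.mem_cons, hk']

lemma pv_step_getD (d : PySem.Dict Int Int) (hnd : d.keys.Nodup) (y v : Int) :
    (d.items.foldl (fun d' p => d'.insert (p.1 + y) (d'.getD (p.1 + y) 0 + p.2)) d).getD v 0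
      = d.getD v 0 + d.getD (v - y) 0 := by
  have hkeys : d.items.map (fun p => p.1 + y) = d.keys.map (fun k => k + y) := by
    simp [PySem.Dict.keys, List.map_map, Function.comp]
  have hnd' : (d.items.map (fun p => p.1 + y)).Nodup := by
    rw [hkeys]
    exact hnd.map (fun a b h => by omega)
  rw [pv_ins_fold_getD y d.items d v hnd']
  congr 1
  rw [PySem.Dict.items_eq_map_keys d hnd 0, List.filter_map]
  have hpred : ∀ k, ((fun p : Int × Int => p.1 + y == v) ∘ (fun k => (k, d.getD k 0))) k
      = (k == v - y) := by
    intro k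
    simp only [Function.comp]
    by_cases h : k + y = v
    · simp [show k = v - y by omega]
    · simp [h, show ¬ k = v - y by omega]
  rw [List.filter_congr (fun k _ => hpred k), pv_filter_nodup (v - y) d.keys hnd]
  by_cases hmem : v - y ∈ d.keys
  · simp [hmem]
  · have hc : d.contains (v - y) = false := by
      rw [← Bool.not_eq_true]
      intro h
      exact hmem ((PySem.Dict.contains_iff_mem_keys d (v - y)).mp h)
    simp [hmem, PySem.Dict.getD_of_not_contains d 0 hc]

lemma pv_ofList_map_ofList (y : Int) (l : List Int) :
    PySem.Set.ofList ((PySem.Set.ofList l).map (fun k => k + y))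
      = PySem.Set.ofList (l.map (fun k => k + y)) := by
  induction l using List.reverseRecOn with
  | nil => rfl
  | append_singleton xs a ih =>
    rw [PySem.Set.ofList_append_singleton]
    by_cases hmem : a ∈ PySem.Set.ofList xs
    · rw [PySem.Set.add_of_mem hmem, ih, List.map_append]
      have : a + y ∈ PySem.Set.ofList (xs.map (fun k => k + y)) := by
        rw [PySem.Set.mem_ofList]
        exact List.mem_map.mpr ⟨a, (PySem.Set.mem_ofList xs a).mp hmem, rfl⟩
      simp only [List.map_cons, List.map_nil]
      rw [PySem.Set.ofList_append_singleton, PySem.Set.add_of_mem this]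
    · rw [PySem.Set.add_of_not_mem hmem, List.map_append, List.map_append]
      simp only [List.map_cons, List.map_nil]
      rw [PySem.Set.ofList_append_singleton, PySem.Set.ofList_append_singleton, ih]

-- the crux: one DP step on Counter(l) counts l ++ (l shifted by y)
lemma pv_step_counter (l : List Int) (y : Int) :
    (PySem.Dict.counter l).items.foldl
        (fun d' p => d'.insert (p.1 + y) (d'.getD (p.1 + y) 0 + p.2)) (PySem.Dict.counter l)
      = PySem.Dict.counter (l ++ l.map (fun k => k + y)) := by
  have hR : PySem.Dict.counter (l ++ l.map (fun k => k + y))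
      = (l.map (fun k => k + y)).foldl (fun d x => d.modify x 0 (· + 1)) (PySem.Dict.counter l) := by
    rw [PySem.Dict.counter_eq_foldl, List.foldl_append, ← PySem.Dict.counter_eq_foldl]
  rw [hR]
  set d := PySem.Dict.counter l with hd
  have hnd : d.keys.Nodup := PySem.Dict.nodup_keys_counter l
  have hndL : (d.items.foldl
      (fun d' p => d'.insert (p.1 + y) (d'.getD (p.1 + y) 0 + p.2)) d).keys.Nodup :=
    PySem.Dict.nodup_keys_foldl_insert_key d.items (fun p => p.1 + y)
      (fun d' p => d'.getD (p.1 + y) 0 + p.2) d hnd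
  have hndR : ((l.map (fun k => k + y)).foldl
      (fun d x => d.modify x 0 (· + 1)) d).keys.Nodup :=
    PySem.Dict.nodup_keys_foldl_modify_key (l.map (fun k => k + y)) id 0
      (fun _ _ => (· + 1)) d hnd
  have hkeys : (d.items.foldl
      (fun d' p => d'.insert (p.1 + y) (d'.getD (p.1 + y) 0 + p.2)) d).keys
      = ((l.map (fun k => k + y)).foldl (fun d x => d.modify x 0 (· + 1)) d).keys := by
    rw [PySem.Dict.keys_foldl_insert_key d.items (fun p => p.1 + y)
      (fun d' p => d'.getD (p.1 + y) 0 + p.2) d]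
    rw [PySem.Dict.keys_foldl_modify (l.map (fun k => k + y)) 0 (fun _ _ => (· + 1)) d]
    rw [PySem.Set.update_eq_append_filter, PySem.Set.update_eq_append_filter]
    have : d.items.map (fun p => p.1 + y) = d.keys.map (fun k => k + y) := by
      simp [PySem.Dict.keys, List.map_map, Function.comp]
    rw [this, hd, PySem.Dict.keys_counter, pv_ofList_map_ofList]
  have hgetD : ∀ v, (d.items.foldl
      (fun d' p => d'.insert (p.1 + y) (d'.getD (p.1 + y) 0 + p.2)) d).getD v 0
      = ((l.map (fun k => k + y)).foldl (fun d x => d.modify x 0 (· + 1)) d).getD v 0 := by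
    intro v
    rw [pv_step_getD d hnd y v, PySem.Dict.getD_foldl_modify_add_one]
    congr 1
    have : (l.map (fun k => k + y)).count v = l.count (v - y) := by
      have hcnt := List.count_map_of_injective l (fun k => k + y)
        (fun a b h => by exact add_right_cancel h) (v - y)
      simpa [sub_add_cancel] using hcnt
    rw [this, hd, PySem.Dict.getD_counter]
  apply PySem.Dict.ext
  rw [PySem.Dict.items_eq_map_keys _ hndL 0, PySem.Dict.items_eq_map_keys _ hndR 0, ← hkeys]
  apply List.map_congr_left
  intro k _
  rw [hgetD k]

lemma pv_sums_append (xs : List Int) (y : Int) :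
    pvSums (xs ++ [y]) = pvSums xs ++ (pvSums xs).map (fun k => k + y) := by
  have hlen : (xs ++ [y]).length = xs.length + 1 := by simp
  have hpow : 2 ^ (xs.length + 1) = 2 ^ xs.length + 2 ^ xs.length := by
    rw [pow_succ]; omega
  rw [pvSums, pvSums, hlen, hpow, List.range_add, List.map_append, List.map_map, List.map_map]
  congr 1
  · apply List.map_congr_left
    intro m hm
    have hm' : m < 2 ^ xs.length := List.mem_range.mp hm
    rw [pvMaskSum, pvMaskSum, hlen, List.range_succ, List.map_append, List.sum_append]
    have hbit : m.testBit xs.length = false := Nat.testBit_lt_two_pow hm'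
    simp only [List.map_cons, List.map_nil, List.sum_cons, List.sum_nil, hbit,
      Bool.false_eq_true, if_false, add_zero]
    apply congrArg
    apply List.map_congr_left
    intro j hj
    have hj' : j < xs.length := List.mem_range.mp hj
    have : (xs ++ [y]).getD j 0 = xs.getD j 0 := by
      simp [List.getD, List.getElem?_append_left hj']
    rw [this]
  · apply List.map_congr_left
    intro m hm
    have hm' : m < 2 ^ xs.length := List.mem_range.mp hm
    simp only [Function.comp]
    rw [pvMaskSum, pvMaskSum, hlen, List.range_succ, List.map_append, List.sum_append]
    have hbit : (2 ^ xs.length + m).testBit xs.length = true := by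
      have hdiv : (2 ^ xs.length + m) / 2 ^ xs.length = 1 := by
        rw [Nat.add_div_left m (Nat.two_pow_pos xs.length), Nat.div_eq_of_lt hm']
      rw [Nat.testBit_eq_decide_div_mod_eq, hdiv]
      decide
    have hgetD : (xs ++ [y]).getD xs.length 0 = y := by
      simp [List.getD]
    simp only [List.map_cons, List.map_nil, List.sum_cons, List.sum_nil, hbit, if_true, hgetD]
    rw [add_zero, add_comm ((List.map _ (List.range xs.length)).sum) y, add_comm _ y]
    apply congrArg
    apply congrArg
    apply List.map_congr_left
    intro j hj
    have hj' : j < xs.length := List.mem_range.mp hj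
    have h1 : (2 ^ xs.length + m).testBit j = m.testBit j := Nat.testBit_two_pow_add_gt hj' m
    have h2 : (xs ++ [y]).getD j 0 = xs.getD j 0 := by
      simp [List.getD, List.getElem?_append_left hj']
    rw [h1, h2]

lemma pv_fold_B (x : List Int) :
    x.foldl (fun d v => d.items.foldl
        (fun d' p => d'.insert (p.1 + v) (d'.getD (p.1 + v) 0 + p.2)) d)
      ((PySem.Dict.empty : PySem.Dict Int Int).insert 0 1)
      = PySem.Dict.counter (pvSums x) := by
  induction x using List.reverseRecOn with
  | nil => decide
  | append_singleton xs y ih =>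
    rw [List.foldl_append, ih, List.foldl_cons, List.foldl_nil, pv_step_counter,
        pv_sums_append]

-- ===== VERDICT (by name: the statement is the Claim_ definition above) =====
theorem f_spec : Claim_equal_f := by
  intro x _
  show f x = f_alt x
  rw [pv_f_eq_counter, f_alt, pv_fold_B]
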